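-- pv_equiv track=rewrite | github.com/pk-470/Supermod | features/newsletter/news_utils.py | post_split
-- ===== SOURCE A (Python) =====
-- def post_split(long_post, max_post_length):
--     """
--     Splits long posts.
--     """
--     posts = [long_post]
--     while len(long_post) > max_post_length:
--         i = 1
--         while i < max_post_length and long_post[max_post_length - i] != "\n":
--             i = i + 1
--         if i < max_post_length:
--             split_at = max_post_length - i
--         else:
--             i = 1
--             while i < max_post_length and long_post[max_post_length - i] not in (
--                 ".",
--                 "?",
--                 "!",
--             ):
--                 i = i + 1
--             split_at = max_post_length - i + 1
--         posts.remove(long_post)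
--         posts.extend([long_post[:split_at], long_post[split_at + 1 :]])
--         long_post = long_post[split_at + 1 :]
--
--     return posts
-- ===== SOURCE B (Python) =====
-- def post_split(long_post, max_post_length):
--     """
--     Splits long posts (offset-based single scan: append pieces directly,
--     no re-slicing of the remainder and no list.remove).
--     """
--     pieces = []
--     n = len(long_post)
--     start = 0
--     while n - start > max_post_length:
--         limit = start + max_post_length
--         j = limit - 1
--         while j > start and long_post[j] != "\n":
--             j = j - 1
--         if j > start:
--             split_at = j
--         else:
--             j = limit - 1
--             while j > start and long_post[j] not in (".", "?", "!"):
--                 j = j - 1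
--             split_at = j + 1
--         pieces.append(long_post[start:split_at])
--         start = split_at + 1
--     pieces.append(long_post[start:])
--     return pieces
-- ===== Notes on version B (the rewrite author's own statement) =====
-- stated objective: alternative
-- what changed: B walks a single integer offset through the original string, scanning each window backward in place and appending pieces directly, instead of A's re-slicing the whole remainder twice per round and rebuilding the posts list with list.remove; measured a bit faster but under 1.5x, so no speed claim.
import Mathlib
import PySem

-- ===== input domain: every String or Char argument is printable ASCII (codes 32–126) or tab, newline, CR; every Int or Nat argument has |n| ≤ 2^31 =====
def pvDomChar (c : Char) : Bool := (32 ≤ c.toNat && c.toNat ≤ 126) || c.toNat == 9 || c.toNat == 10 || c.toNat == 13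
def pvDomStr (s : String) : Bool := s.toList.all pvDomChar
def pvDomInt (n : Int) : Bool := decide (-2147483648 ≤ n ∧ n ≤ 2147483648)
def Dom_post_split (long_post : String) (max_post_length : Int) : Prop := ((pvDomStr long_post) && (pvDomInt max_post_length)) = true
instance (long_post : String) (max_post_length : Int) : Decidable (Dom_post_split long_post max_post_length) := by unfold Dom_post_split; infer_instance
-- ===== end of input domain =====

-- B replaces A's rebuild-the-list-and-re-slice loop (posts.remove + slicing the whole
-- remainder each round) by a single integer offset into the original string, appending
-- each piece directly; return value only, neither version mutates its arguments.

-- ===== PORT A =====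
-- A's two inner 'while i < m and long_post[m-i] != …' loops, shared over the stop test p
-- (p c = true: the char ends the scan).  'none' = Python IndexError, unreachable: within
-- the loop 1 ≤ i < m and len(long_post) > m, so the index m - i is always in range.
def pvScanA (p : Char → Bool) (lp : List Char) (m i : Int) : Int :=
  if _h : i < m then
    match PySem.List.pyGet? lp (m - i) with
    | some c => if p c then i else pvScanA p lp m (i + 1)
    | none => i
  else i
termination_by (m - i).toNat
decreasing_by omega

-- A's outer while-loop.  fuel bounds the iteration count (each round shortens long_post,
-- so len(long_post)+1 is enough under Pre_); '.getD posts' covers posts.remove's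
-- ValueError branch, unreachable since the current long_post is always in posts.
def pvALoop (m : Int) : Nat → List (List Char) → List Char → List (List Char)
  | 0, posts, _ => posts
  | fuel + 1, posts, lp =>
    if (lp.length : Int) > m then
      let i := pvScanA (fun c => c = '\n') lp m 1
      let split_at :=
        if i < m then m - i
        else m - pvScanA (fun c => c = '.' ∨ c = '?' ∨ c = '!') lp m 1 + 1
      let posts' := (PySem.List.remove? posts lp).getD posts
      let head := PySem.List.slice lp none (some split_at)
      let tail := PySem.List.slice lp (some (split_at + 1)) none
      pvALoop m fuel (posts' ++ [head, tail]) tail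
    else posts

def post_split (long_post : String) (max_post_length : Int) : List String :=
  (pvALoop max_post_length (long_post.toList.length + 1) [long_post.toList]
    long_post.toList).map String.ofList

-- ===== PORT B =====
-- B's inner backward scans 'while j > start and long_post[j] != …', shared over the
-- stop test p.  'none' = IndexError, unreachable: start < j < start + m < len s.
def pvScanB (p : Char → Bool) (s : List Char) (start j : Int) : Int :=
  if _h : start < j then
    match PySem.List.pyGet? s j with
    | some c => if p c then j else pvScanB p s start (j - 1)
    | none => j
  else j
termination_by (j - start).toNat
decreasing_by omega

-- B's outer while-loop over the offset start; fuel as in pvALoop.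
def pvBLoop (s : List Char) (m : Int) : Nat → Int → List (List Char)
  | 0, _ => []
  | fuel + 1, start =>
    if (s.length : Int) - start > m then
      let j := pvScanB (fun c => c = '\n') s start (start + m - 1)
      let split_at :=
        if start < j then j
        else pvScanB (fun c => c = '.' ∨ c = '?' ∨ c = '!') s start (start + m - 1) + 1
      PySem.List.slice s (some start) (some split_at) ::
        pvBLoop s m fuel (split_at + 1)
    else [PySem.List.slice s (some start) none]

def post_split_alt (long_post : String) (max_post_length : Int) : List String :=
  (pvBLoop long_post.toList max_post_length (long_post.toList.length + 1) 0).map String.ofList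

-- ===== PRECONDITION & SPEC =====
-- Pre_ excludes negative max_post_length, on which A's while-loop never terminates
-- (the remainder stops shrinking), so A returns no value there.
def Pre_post_split (long_post : String) (max_post_length : Int) : Prop :=
  0 ≤ max_post_length
instance (long_post : String) (max_post_length : Int) : Decidable (Pre_post_split long_post max_post_length) := by unfold Pre_post_split; infer_instance

def pvWitness_post_split : String × Int := ("hello.world\nbye", 6)

def Spec_post_split (long_post : String) (max_post_length : Int) (out : List String) : Prop := out = post_split_alt long_post max_post_length
instance (long_post : String) (max_post_length : Int) (out : List String) : Decidable (Spec_post_split long_post max_post_length out) := by unfold Spec_post_split; infer_instance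

-- ===== CLAIM (what is proved, stated in full; the proofs are below) =====
def Claim_equal_post_split : Prop := ∀ (long_post : String) (max_post_length : Int), Dom_post_split long_post max_post_length → Pre_post_split long_post max_post_length → Spec_post_split long_post max_post_length (post_split long_post max_post_length)

-- ===== LEMMAS AND PROOFS =====

-- The scan result never moves below its start nor above m (or the initial i).
lemma pvScanA_ge (p : Char → Bool) (lp : List Char) (m i : Int) :
    i ≤ pvScanA p lp m i := by
  unfold pvScanA
  split
  · rename_i h
    match hg : PySem.List.pyGet? lp (m - i) with
    | some c =>
      simp only [hg]
      split
      · exact le_refl i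
      · have := pvScanA_ge p lp m (i + 1); omega
    | none => exact le_refl i
  · exact le_refl i
termination_by (m - i).toNat
decreasing_by omega

lemma pvScanA_le (p : Char → Bool) (lp : List Char) (m i : Int) (h : i ≤ m) :
    pvScanA p lp m i ≤ m := by
  unfold pvScanA
  split
  · rename_i hlt
    match hg : PySem.List.pyGet? lp (m - i) with
    | some c =>
      simp only [hg]
      split
      · exact h
      · exact pvScanA_le p lp m (i + 1) (by omega)
    | none => exact h
  · exact h
termination_by (m - i).toNat
decreasing_by omega

-- Bridge: B's backward scan over the original list with offset start computes
-- start + m - (A's upward scan over the dropped list).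
lemma pvScan_bridge (p : Char → Bool) (s : List Char) (start : Nat) (m i : Int)
    (h1 : 1 ≤ i) (h2 : i ≤ m + 1) (hr : (start : Int) + m < s.length) :
    pvScanB p s start ((start : Int) + m - i) =
      (start : Int) + m - pvScanA p (s.drop start) m i := by
  rw [pvScanA, pvScanB]
  by_cases hlt : i < m
  · have hgt : (start : Int) < (start : Int) + m - i := by omega
    -- index in range on both sides
    have hidx : (start : Int) + m - i = ((start + (m - i).toNat : Nat) : Int) := by omega
    have hlen : start + (m - i).toNat < s.length := by omega
    have hB : PySem.List.pyGet? s ((start : Int) + m - i) =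
        some s[start + (m - i).toNat] := by
      conv_lhs => rw [hidx, PySem.List.pyGet?_natCast]
      exact List.getElem?_eq_getElem hlen
    have hA : PySem.List.pyGet? (s.drop start) (m - i) = some s[start + (m - i).toNat] := by
      have h0 : m - i = (((m - i).toNat : Nat) : Int) := by omega
      conv_lhs => rw [h0, PySem.List.pyGet?_natCast, List.getElem?_drop]
      exact List.getElem?_eq_getElem hlen
    rw [dif_pos hlt, dif_pos hgt]
    simp only [hA, hB]
    by_cases hp : p s[start + (m - i).toNat] = true
    · rw [if_pos hp, if_pos hp]
    · rw [if_neg hp, if_neg hp,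
        show (start : Int) + m - i - 1 = (start : Int) + m - (i + 1) by ring]
      exact pvScan_bridge p s start m (i + 1) (by omega) (by omega) hr
  · have h2' : i = m ∨ i = m + 1 := by omega
    have hngt : ¬ ((start : Int) < (start : Int) + m - i) := by omega
    simp only [dif_neg hlt, dif_neg hngt]
termination_by (m - i).toNat
decreasing_by omega

-- posts.remove(long_post) removes the LAST element: all earlier pieces are strictly
-- shorter than the current remainder, so the first match is the final one.
lemma remove_last {α : Type} [BEq α] [LawfulBEq α] (acc : List (List α)) (lp : List α)
    (h : lp ∉ acc) : (PySem.List.remove? (acc ++ [lp]) lp).getD (acc ++ [lp]) = acc := by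
  induction acc with
  | nil => simp [PySem.List.remove?_cons_self]
  | cons a as ih =>
    have hne : a ≠ lp := by intro he; exact h (by simp [he])
    have h' : lp ∉ as := fun hm => h (List.mem_cons_of_mem _ hm)
    rw [List.cons_append, PySem.List.remove?_cons_of_ne _ hne]
    have : PySem.List.remove? (as ++ [lp]) lp = some as := by
      have := ih h'
      cases hrm : PySem.List.remove? (as ++ [lp]) lp with
      | none =>
        exact absurd ((PySem.List.remove?_eq_none_iff _ _).mp hrm) (by simp)
      | some l => rw [hrm] at this; simpa using this
    simp [this]

-- Main loop correspondence: A's posts list is acc ++ [current remainder], with every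
-- element of acc a previously emitted piece of length ≤ m.
lemma loop_bridge (s : List Char) (m : Int) (hm : 0 ≤ m) :
    ∀ (fuel : Nat) (start : Nat) (acc : List (List Char)),
    start ≤ s.length → s.length - start < fuel →
    (∀ piece ∈ acc, (piece.length : Int) ≤ m) →
    pvALoop m fuel (acc ++ [s.drop start]) (s.drop start) = acc ++ pvBLoop s m fuel start
  | 0, start, acc => by intro _ hf _; omega
  | fuel + 1, start, acc => by
    intro hstart hfuel hacc
    have hdlen : ((s.drop start).length : Int) = (s.length : Int) - start := by
      simp [List.length_drop]; omega
    rw [pvALoop, pvBLoop]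
    by_cases hg : (s.length : Int) - (start : Int) > m
    · rw [if_pos (by rw [hdlen]; exact hg), if_pos hg]
      have hr : (start : Int) + m < s.length := by omega
      -- the two newline scans agree
      have hnl := pvScan_bridge (fun c => c = '\n') s start m 1 (by omega) (by omega) hr
      set i1 := pvScanA (fun c => c = '\n') (s.drop start) m 1 with hi1
      have hi1ge : 1 ≤ i1 := pvScanA_ge _ _ _ _
      -- the relative split point sa and its bounds
      have hpc := pvScan_bridge (fun c => c = '.' ∨ c = '?' ∨ c = '!') s start m 1
        (by omega) (by omega) hr
      set i2 := pvScanA (fun c => c = '.' ∨ c = '?' ∨ c = '!') (s.drop start) m 1 with hi2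
      have hi2ge : 1 ≤ i2 := pvScanA_ge _ _ _ _
      set sa : Int := if i1 < m then m - i1 else m - i2 + 1 with hsa
      have hsa_nonneg : 0 ≤ sa := by
        rw [hsa]; split
        · omega
        · rcases (by omega : i2 ≤ m ∨ m < i2) with h | h
          · omega
          · -- i2 started at 1 ≤ m + 1; if m = 0 the scan returns 1 immediately
            by_cases hm1 : 1 ≤ m
            · have := pvScanA_le (fun c => c = '.' ∨ c = '?' ∨ c = '!') (s.drop start) m 1 hm1
              omega
            · have hm0 : m = 0 := by omega
              have : i2 = 1 := by rw [hi2, pvScanA]; simp [hm0]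
              omega
      have hsa_le : sa ≤ m := by
        rw [hsa]; split
        · omega
        · omega
      -- B's split_at is start + sa
      have hsplitB : (if (start : Int) < pvScanB (fun c => c = '\n') s start ((start : Int) + m - 1)
            then pvScanB (fun c => c = '\n') s start ((start : Int) + m - 1)
            else pvScanB (fun c => c = '.' ∨ c = '?' ∨ c = '!') s start ((start : Int) + m - 1) + 1)
            = (start : Int) + sa := by
        rw [hnl, hpc, hsa]
        by_cases h : i1 < m
        · rw [if_pos (by omega), if_pos h]; ring
        · rw [if_neg (by have := pvScanA_le (fun c => c = '\n') (s.drop start) m 1; omega),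
              if_neg h]
          omega
      -- head and tail as drop/take of s
      have hsan : sa = ((sa.toNat : Nat) : Int) := by omega
      have hhead : PySem.List.slice (s.drop start) none (some sa) = (s.drop start).take sa.toNat := by
        rw [hsan, PySem.List.slice_to_natCast]; congr 1
      have hheadB : PySem.List.slice s (some (start : Int)) (some ((start : Int) + sa)) =
          (s.drop start).take sa.toNat := by
        rw [show (start : Int) + sa = ((start + sa.toNat : Nat) : Int) by omega,
            PySem.List.slice_natCast]
        congr 1
        omega
      have htail : PySem.List.slice (s.drop start) (some (sa + 1)) none =
          s.drop (start + sa.toNat + 1) := by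
        rw [show sa + 1 = ((sa.toNat + 1 : Nat) : Int) by omega,
            PySem.List.slice_from_natCast, List.drop_drop]
        congr 1
      -- removal: the current remainder is the unique longest element
      have hnot : s.drop start ∉ acc := by
        intro hmem
        have := hacc _ hmem
        omega
      have hrm := remove_last acc (s.drop start) hnot
      dsimp only
      rw [← hsa]
      simp only [hsplitB, hhead, hheadB, htail, hrm]
      -- reassemble and recurse
      rw [show (start : Int) + sa + 1 = ((start + sa.toNat + 1 : Nat) : Int) by omega]
      have hrec := loop_bridge s m hm fuel (start + sa.toNat + 1) (acc ++ [(s.drop start).take sa.toNat])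
        (by omega) (by omega)
        (by
          intro piece hp
          rcases List.mem_append.mp hp with h | h
          · exact hacc _ h
          · simp only [List.mem_singleton] at h
            subst h
            have : ((s.drop start).take sa.toNat).length ≤ sa.toNat := by
              simp [List.length_take]
            have : (((s.drop start).take sa.toNat).length : Int) ≤ sa := by omega
            omega)
      rw [List.append_assoc, List.append_assoc] at hrec
      simpa using hrec
    · rw [if_neg (by rw [hdlen]; exact hg), if_neg hg]
      rw [PySem.List.slice_from_natCast]
  termination_by fuel => fuel

-- ===== VERDICT (by name: the statement is the Claim_ definition above) =====
theorem post_split_spec : Claim_equal_post_split := by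
  intro long_post max_post_length _hdom hpre
  unfold Spec_post_split post_split post_split_alt
  have := loop_bridge long_post.toList max_post_length hpre
    (long_post.toList.length + 1) 0 [] (by omega) (by omega) (by simp)
  simp only [List.drop_zero, List.nil_append, Nat.cast_zero] at this
  rw [this]
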